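-- pv_equiv track=rewrite | github.com/SiddeshSambasivam/codebase | code/problems/covid19.py | find_spread
-- ===== SOURCE A (Python) =====
-- def find_spread(n, dist):
--     spread = []
--     d1,d2 = [0]*n, [0]*n
--     for i in range(0,n-1):
--         d1[i]= abs(dist[i+1]-dist[i])
--     for i in range(n-1, 0, -1):
--         d2[i] = abs(dist[i]-dist[i-1])
--     for i in range(n):
--         inf =1
--         for j in range(i, n-1):
--             if d1[j]<=2 :
--                 inf +=1
--             else:
--                 break
--         for j in range(i,-1,-1):
--             if d2[j]<=2 and d2[j]!=0:
--                 inf+=1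
--             else:
--                 break
--         spread.append(inf)
--
--     return [min(spread),max(spread)]
-- ===== SOURCE B (Python) =====
-- # O(n) re-implementation: precompute run lengths of adjacent gaps with two
-- # linear scans instead of re-scanning left and right from every index.
--
-- def _runs(p, xs):
--     # result[i] = length of the maximal prefix of xs[i:] whose elements satisfy p
--     acc = [0]
--     for x in reversed(xs):
--         acc.append(acc[-1] + 1 if p(x) else 0)
--     acc.reverse()
--     return acc
--
-- def find_spread(n, dist):
--     d = [abs(dist[i + 1] - dist[i]) for i in range(n - 1)]
--     R = _runs(lambda x: x <= 2, d)                    # spread to the right of i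
--     L = _runs(lambda x: 0 < x <= 2, d[::-1])[::-1]    # spread to the left of i
--     inf = [1 + R[i] + L[i] for i in range(n)]
--     return [min(inf), max(inf)]
-- ===== Notes on version B (the rewrite author's own statement) =====
-- stated objective: faster
-- what changed: Replaces the per-index left/right rescans with two linear run-length scans (R[i]=run of gaps<=2 to the right, L[i]=run of nonzero gaps<=2 to the left), so inf[i]=1+R[i]+L[i] in one pass.
import Mathlib
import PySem

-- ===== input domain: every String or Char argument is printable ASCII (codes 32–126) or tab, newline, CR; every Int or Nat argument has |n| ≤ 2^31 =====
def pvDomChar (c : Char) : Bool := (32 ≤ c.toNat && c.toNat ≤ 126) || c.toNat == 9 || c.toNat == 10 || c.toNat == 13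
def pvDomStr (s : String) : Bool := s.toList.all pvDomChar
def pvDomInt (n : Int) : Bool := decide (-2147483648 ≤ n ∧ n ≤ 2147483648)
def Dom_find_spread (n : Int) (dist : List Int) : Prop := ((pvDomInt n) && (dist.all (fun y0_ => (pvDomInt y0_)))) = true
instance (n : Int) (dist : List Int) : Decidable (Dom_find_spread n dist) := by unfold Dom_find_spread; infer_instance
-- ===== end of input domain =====

-- B replaces A's per-index left/right rescans with two linear run-length scans; same return value wherever A returns.

-- ===== PORT A =====
-- inner `for j in range(i, n-1): if d1[j]<=2: inf+=1 else: break`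
def loopRightA (d1 : List Int) (m : Nat) (j : Nat) (inf : Int) : Int :=
  if _h : j < m then
    if d1.getD j 0 ≤ 2 then loopRightA d1 m (j + 1) (inf + 1) else inf
  else inf
termination_by m - j

-- inner `for j in range(i, -1, -1): if d2[j]<=2 and d2[j]!=0: inf+=1 else: break`
def loopLeftA (d2 : List Int) : Nat → Int → Int
  | 0, inf => if d2.getD 0 0 ≤ 2 ∧ d2.getD 0 0 ≠ 0 then inf + 1 else inf
  | j + 1, inf =>
      if d2.getD (j + 1) 0 ≤ 2 ∧ d2.getD (j + 1) 0 ≠ 0 then loopLeftA d2 j (inf + 1) else inf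

def find_spread (n : Int) (dist : List Int) : List Int :=
  let N := n.toNat
  -- `for i in range(0, n-1): d1[i] = abs(dist[i+1]-dist[i])`
  let d1 := (List.range (N - 1)).foldl
      (fun a i => a.set i (|dist.getD (i + 1) 0 - dist.getD i 0|)) (List.replicate N 0)
  -- `for i in range(n-1, 0, -1): d2[i] = abs(dist[i]-dist[i-1])` — ported with i = N-1-k,
  -- k = 0 .. N-2, which is exactly the index sequence n-1, n-2, …, 1 (exact for n ≥ 1)
  let d2 := (List.range (N - 1)).foldl
      (fun a k => a.set (N - 1 - k) (|dist.getD (N - 1 - k) 0 - dist.getD (N - 1 - k - 1) 0|))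
      (List.replicate N 0)
  let spread := (List.range N).foldl
      (fun acc i => acc ++ [loopLeftA d2 i (loopRightA d1 (N - 1) i 1)]) []
  [(PySem.List.min? spread (fun x => x)).getD 0, (PySem.List.max? spread (fun x => x)).getD 0]

-- ===== PORT B =====
-- Source B `_runs`: append the running run-length while scanning reversed xs, then reverse
def runsB (p : Int → Prop) [DecidablePred p] (xs : List Int) : List Int :=
  (xs.reverse.foldl (fun acc x => acc ++ [if p x then acc.getLastD 0 + 1 else 0]) [0]).reverse

def find_spread_alt (n : Int) (dist : List Int) : List Int :=
  let N := n.toNat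
  let d := (List.range (N - 1)).map (fun i => |dist.getD (i + 1) 0 - dist.getD i 0|)
  let R := runsB (fun x => x ≤ 2) d
  let L := (runsB (fun x => 0 < x ∧ x ≤ 2) d.reverse).reverse
  let inf := (List.range N).map (fun i => 1 + R.getD i 0 + L.getD i 0)
  [(PySem.List.min? inf (fun x => x)).getD 0, (PySem.List.max? inf (fun x => x)).getD 0]

-- ===== PRECONDITION & SPEC =====
-- Pre_ excludes exactly the inputs where the Python A raises: n ≤ 0 (min() of an
-- empty list, ValueError) and len(dist) < n with n ≥ 2 (IndexError while building
-- d1; for n = 1 neither program reads dist, so any dist is admitted).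
def Pre_find_spread (n : Int) (dist : List Int) : Prop :=
  1 ≤ n ∧ (n ≤ (dist.length : Int) ∨ n = 1)
instance (n : Int) (dist : List Int) : Decidable (Pre_find_spread n dist) := by
  unfold Pre_find_spread; infer_instance

def pvWitness_find_spread : Int × List Int := (4, [1, 2, 10, 11])

def Spec_find_spread (n : Int) (dist : List Int) (out : List Int) : Prop := out = find_spread_alt n dist
instance (n : Int) (dist : List Int) (out : List Int) : Decidable (Spec_find_spread n dist out) := by unfold Spec_find_spread; infer_instance

-- ===== CLAIM (what is proved, stated in full; the proofs are below) =====
def Claim_equal_find_spread : Prop := ∀ (n : Int) (dist : List Int), Dom_find_spread n dist → Pre_find_spread n dist → Spec_find_spread n dist (find_spread n dist)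

-- ===== LEMMAS AND PROOFS =====

-- length of the maximal prefix satisfying p
def fcount (p : Int → Prop) [DecidablePred p] : List Int → Int
  | [] => 0
  | x :: xs => if p x then fcount p xs + 1 else 0

theorem runsB_cons (p : Int → Prop) [DecidablePred p] (x : Int) (xs : List Int) :
    runsB p (x :: xs) = (if p x then (runsB p xs).headD 0 + 1 else 0) :: runsB p xs := by
  unfold runsB
  rw [List.reverse_cons, List.foldl_append]
  simp

theorem runsB_length (p : Int → Prop) [DecidablePred p] (xs : List Int) :
    (runsB p xs).length = xs.length + 1 := by
  induction xs with
  | nil => simp [runsB]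
  | cons x xs ih => rw [runsB_cons]; simp [ih]

theorem runsB_getD (p : Int → Prop) [DecidablePred p] (xs : List Int) (i : Nat) :
    (runsB p xs).getD i 0 = fcount p (xs.drop i) := by
  induction xs generalizing i with
  | nil => cases i <;> simp [runsB, fcount]
  | cons x xs ih =>
      rw [runsB_cons]
      cases i with
      | zero =>
          have h0 : (runsB p xs).headD 0 = fcount p xs := by
            have := ih 0
            simpa [List.getD_eq_getElem?_getD, List.headD_eq_head?_getD,
                   List.head?_eq_getElem?] using this
          simp only [List.headD_eq_head?_getD] at h0
          simp [fcount, h0]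
      | succ j => simpa [fcount] using ih j

-- characterisation of A's `[0]*n` array written by `for i in range(k)` at index i
theorem foldl_set_range_getD (f : Nat → Int) (k N j : Nat) :
    (((List.range k).foldl (fun a i => a.set i (f i)) (List.replicate N (0:Int)))).getD j 0
      = if j < k ∧ j < N then f j else 0 := by
  induction k with
  | zero =>
      simp only [List.range_zero, List.foldl_nil]
      by_cases h : j < N
      · simp [h]
      · simp [List.getD_eq_getElem?_getD, h]
  | succ k ih =>
      rw [List.range_succ, List.foldl_append, List.foldl_cons, List.foldl_nil]
      have hlen : (((List.range k).foldl (fun a i => a.set i (f i))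
          (List.replicate N (0:Int)))).length = N := by
        have : ∀ (ks : List Nat) (init : List Int),
            (ks.foldl (fun a i => a.set i (f i)) init).length = init.length := by
          intro ks; induction ks with
          | nil => intro init; rfl
          | cons a t iht => intro init; simp [List.foldl_cons, iht]
        simp [this]
      rw [List.getD_eq_getElem?_getD, List.getElem?_set, hlen]
      by_cases hkj : k = j
      · subst hkj
        by_cases hN : k < N <;> simp [hN]
      · simp [hkj, ← List.getD_eq_getElem?_getD, ih]
        omega

-- length is preserved by the d2-style write loop
theorem foldl_set_length (g : Nat → Nat) (f : Nat → Int) (ks : List Nat) (init : List Int) :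
    (ks.foldl (fun a k => a.set (g k) (f (g k))) init).length = init.length := by
  induction ks generalizing init with
  | nil => rfl
  | cons a t ih => simp [List.foldl_cons, ih]

-- characterisation of A's d2 array: writes at indices N-1, N-2, …, N-k
theorem foldl_set_range_rev_getD (f : Nat → Int) (N : Nat) (hN : 1 ≤ N) :
    ∀ (k : Nat), k ≤ N - 1 → ∀ (j : Nat),
    (((List.range k).foldl (fun a i => a.set (N - 1 - i) (f (N - 1 - i)))
        (List.replicate N (0:Int)))).getD j 0
      = if N - k ≤ j ∧ j ≤ N - 1 then f j else 0 := by
  intro k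
  induction k with
  | zero =>
      intro _ j
      have hj : ¬ (N - 0 ≤ j ∧ j ≤ N - 1) := by omega
      simp only [List.range_zero, List.foldl_nil, hj, if_false]
      by_cases h : j < N
      · simp [h]
      · simp [List.getD_eq_getElem?_getD, h]
  | succ k ih =>
      intro hk j
      rw [List.range_succ, List.foldl_append, List.foldl_cons, List.foldl_nil]
      have hlen := foldl_set_length (fun i => N - 1 - i) f (List.range k) (List.replicate N (0:Int))
      rw [List.getD_eq_getElem?_getD, List.getElem?_set]
      simp only [hlen, List.length_replicate]
      by_cases hj : N - 1 - k = j
      · subst hj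
        have hlt : N - 1 - k < N := by omega
        have hcond : N - (k+1) ≤ N - 1 - k ∧ N - 1 - k ≤ N - 1 := by omega
        simp [hlt, hcond]
      · rw [if_neg hj, ← List.getD_eq_getElem?_getD, ih (by omega) j]
        have hiff : (N - k ≤ j ∧ j ≤ N - 1) ↔ (N - (k+1) ≤ j ∧ j ≤ N - 1) := by omega
        simp only [hiff]

theorem loopRightA_eq (d1 xs : List Int) (m : Nat) (hm : xs.length = m)
    (hval : ∀ j, j < m → d1.getD j 0 = xs.getD j 0) :
    ∀ (fuel j : Nat), m - j ≤ fuel → ∀ inf,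
      loopRightA d1 m j inf = inf + fcount (fun x => x ≤ 2) (xs.drop j) := by
  intro fuel
  induction fuel with
  | zero =>
      intro j hj inf
      have hjm : ¬ j < m := by omega
      rw [loopRightA]
      simp [hjm, List.drop_eq_nil_of_le (by omega : xs.length ≤ j), fcount]
  | succ fuel ih =>
      intro j hj inf
      by_cases hjm : j < m
      · have hjx : j < xs.length := by omega
        have hv : d1.getD j 0 = xs[j] := by
          rw [hval j hjm, List.getD_eq_getElem?_getD, List.getElem?_eq_getElem hjx]; rfl
        rw [loopRightA, dif_pos hjm, hv, List.drop_eq_getElem_cons hjx]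
        by_cases hc : xs[j] ≤ 2
        · rw [if_pos hc, ih (j+1) (by omega) (inf+1)]
          simp [fcount, hc]; ring
        · rw [if_neg hc]
          simp [fcount, hc]
      · rw [loopRightA]
        simp [hjm, List.drop_eq_nil_of_le (by omega : xs.length ≤ j), fcount]

theorem loopLeftA_eq (d2 xs : List Int) (m : Nat) (hm : xs.length = m)
    (hval : ∀ j, 1 ≤ j → j ≤ m → d2.getD j 0 = xs.getD (j - 1) 0)
    (h0 : d2.getD 0 0 = 0) (hnn : ∀ (j : Nat) (hj : j < xs.length), (0:Int) ≤ xs[j]) :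
    ∀ j, j ≤ m → ∀ inf,
      loopLeftA d2 j inf = inf + fcount (fun x => 0 < x ∧ x ≤ 2) ((xs.take j).reverse) := by
  intro j
  induction j with
  | zero =>
      intro _ inf
      rw [loopLeftA, if_neg (by rw [h0]; simp)]
      simp [fcount]
  | succ j ih =>
      intro hj inf
      have hjx : j < xs.length := by omega
      have hv : d2.getD (j + 1) 0 = xs[j] := by
        rw [hval (j + 1) (by omega) (by omega)]
        simp [List.getD_eq_getElem?_getD, List.getElem?_eq_getElem hjx]
      have htake : (xs.take (j + 1)).reverse = xs[j] :: (xs.take j).reverse := by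
        rw [List.take_add_one]
        simp [List.getElem?_eq_getElem hjx]
      have hcond : (d2.getD (j + 1) 0 ≤ 2 ∧ d2.getD (j + 1) 0 ≠ 0) ↔ (0 < xs[j] ∧ xs[j] ≤ 2) := by
        rw [hv]
        constructor
        · rintro ⟨h1, h2⟩; exact ⟨lt_of_le_of_ne (hnn j hjx) (Ne.symm h2), h1⟩
        · rintro ⟨h1, h2⟩; exact ⟨h2, by omega⟩
      rw [htake]
      by_cases hc : 0 < xs[j] ∧ xs[j] ≤ 2
      · rw [loopLeftA, if_pos (hcond.mpr hc), ih (by omega) (inf + 1)]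
        simp [fcount, hc]; ring
      · rw [loopLeftA, if_neg (fun h => hc (hcond.mp h))]
        simp [fcount, hc]

theorem foldl_append_map {α β : Type} (f : α → β) :
    ∀ (ks : List α) (acc : List β), ks.foldl (fun acc i => acc ++ [f i]) acc = acc ++ ks.map f := by
  intro ks
  induction ks with
  | nil => intro acc; simp
  | cons a t ih => intro acc; simp [List.foldl_cons, ih]

theorem runsB_rev_getD (p : Int → Prop) [DecidablePred p] (xs : List Int) (i : Nat)
    (hi : i ≤ xs.length) :
    ((runsB p xs.reverse).reverse).getD i 0 = fcount p ((xs.take i).reverse) := by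
  have hlen : (runsB p xs.reverse).length = xs.length + 1 := by simp [runsB_length]
  have hi' : i < (runsB p xs.reverse).length := by omega
  rw [List.getD_eq_getElem?_getD, List.getElem?_reverse (by simpa using hi'), hlen]
  rw [← List.getD_eq_getElem?_getD, runsB_getD]
  have harith : xs.length + 1 - 1 - i = xs.length - i := by omega
  rw [harith, List.drop_reverse]
  have : xs.length - (xs.length - i) = i := by omega
  rw [this]

theorem find_spread_spec : Claim_equal_find_spread := by
  intro n dist _hdom hpre
  obtain ⟨hn, hlen⟩ := hpre
  unfold Spec_find_spread
  simp only [find_spread, find_spread_alt]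
  have hN1 : 1 ≤ n.toNat := by omega
  -- abbreviations
  set N := n.toNat with hNdef
  set dd := (List.range (N - 1)).map (fun i => |dist.getD (i + 1) 0 - dist.getD i 0|) with hdd
  have hddlen : dd.length = N - 1 := by simp [hdd]
  have hddval : ∀ j, j < N - 1 → dd.getD j 0 = |dist.getD (j + 1) 0 - dist.getD j 0| := by
    intro j hj
    simp [hdd, List.getD_eq_getElem?_getD, hj]
  have hddnn : ∀ (j : Nat) (hj : j < dd.length), (0:Int) ≤ dd[j] := by
    intro j hj
    have h : dd[j] = |dist.getD (j + 1) 0 - dist.getD j 0| := by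
      simp [hdd]
    rw [h]; positivity
  -- the two per-index run arrays of A
  have hd1 : ∀ j, j < N - 1 →
      ((List.range (N - 1)).foldl
        (fun a i => a.set i (|dist.getD (i + 1) 0 - dist.getD i 0|))
        (List.replicate N (0:Int))).getD j 0 = dd.getD j 0 := by
    intro j hj
    have := foldl_set_range_getD (fun i => |dist.getD (i + 1) 0 - dist.getD i 0|) (N - 1) N j
    simp only at this
    rw [this, if_pos ⟨hj, by omega⟩, hddval j hj]
  have hd2 : ∀ j, 1 ≤ j → j ≤ N - 1 →
      ((List.range (N - 1)).foldl
        (fun a k => a.set (N - 1 - k) (|dist.getD (N - 1 - k) 0 - dist.getD (N - 1 - k - 1) 0|))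
        (List.replicate N (0:Int))).getD j 0 = dd.getD (j - 1) 0 := by
    intro j h1 h2
    have := foldl_set_range_rev_getD
        (fun t => |dist.getD t 0 - dist.getD (t - 1) 0|) N hN1 (N - 1) le_rfl j
    simp only at this
    rw [this, if_pos (by omega)]
    rw [hddval (j - 1) (by omega)]
    have : j - 1 + 1 = j := by omega
    rw [this]
  have hd20 :
      ((List.range (N - 1)).foldl
        (fun a k => a.set (N - 1 - k) (|dist.getD (N - 1 - k) 0 - dist.getD (N - 1 - k - 1) 0|))
        (List.replicate N (0:Int))).getD 0 0 = 0 := by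
    have := foldl_set_range_rev_getD
        (fun t => |dist.getD t 0 - dist.getD (t - 1) 0|) N hN1 (N - 1) le_rfl 0
    simp only at this
    rw [this, if_neg (by omega)]
  -- pointwise equality of the spread/inf lists
  rw [foldl_append_map]
  have hmap : ∀ i ∈ List.range N,
      loopLeftA
        ((List.range (N - 1)).foldl
          (fun a k => a.set (N - 1 - k) (|dist.getD (N - 1 - k) 0 - dist.getD (N - 1 - k - 1) 0|))
          (List.replicate N (0:Int))) i
        (loopRightA
          ((List.range (N - 1)).foldl
            (fun a i => a.set i (|dist.getD (i + 1) 0 - dist.getD i 0|))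
            (List.replicate N (0:Int))) (N - 1) i 1)
      = 1 + (runsB (fun x => x ≤ 2) dd).getD i 0
          + ((runsB (fun x => 0 < x ∧ x ≤ 2) dd.reverse).reverse).getD i 0 := by
    intro i hi
    rw [List.mem_range] at hi
    rw [loopRightA_eq _ dd (N - 1) hddlen
          (fun j hj => by rw [hd1 j hj]) (N - 1) i (by omega) 1]
    rw [loopLeftA_eq _ dd (N - 1) hddlen
          (fun j h1 h2 => hd2 j h1 h2) hd20 hddnn i (by omega)]
    rw [runsB_getD, runsB_rev_getD _ _ _ (by omega)]
  rw [List.nil_append, List.map_congr_left hmap]
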